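-- pv_equiv track=rewrite | github.com/Av007/ytest | puzzle/src/matrix.py | apply_rule_to_matrix
-- ===== SOURCE A (Python) =====
-- def apply_rule_to_matrix(matrix, rule, size):
--     # generator = Generator(size)
--     cols, rows = size + 2, size + 2  # adding rule fields
--     # result = generator.generate_matrix(rows, cols)
--
--     i = 0
--     corners = [
--         (0, 0),
--         (0, rows - 1),
--         (cols - 1, 0),
--         (cols - 1, cols - 1),
--     ]
--
--     # Fill the top row
--     for col in range(cols):
--         if (0, col) in corners:
--             matrix[0][col] = None
--         else:
--             matrix[0][col] = rule[i]
--             i += 1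
--
--     # Fill the right column (excluding the already filled top and bottom corners)
--     for row in range(1, rows):
--         if (cols - 1, row) in corners:
--             matrix[cols - 1][row] = None
--         else:
--             matrix[row][cols - 1] = rule[i]
--             i += 1
--
--     # Fill the bottom row (right to left)
--     for col in range(cols - 2, -1, -1):
--         if (col, row) in corners:
--             matrix[rows - 1][col] = None
--         else:
--             matrix[rows - 1][col] = rule[i]
--             i += 1
--
--     # Fill the left column (bottom to top)
--     for row in range(rows - 2, 0, -1):
--         if (col, row) in corners:
--             matrix[row][0] = None
--         else:
--             matrix[row][0] = rule[i]
--             i += 1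
--
--     return matrix
-- ===== SOURCE B (Python) =====
-- def apply_rule_to_matrix(matrix, rule, size):
--     # Closed-form cell-wise rebuild: each cell's value is computed directly from its
--     # coordinates (no counter, no spiral walk).  Unlike A, does not mutate `matrix`;
--     # the return value is the same.
--     n = size + 2
--     if n <= 0:
--         return matrix
--     k = n - 2
--
--     def cell(r, c, old):
--         if (r == 0 or r == n - 1) and (c == 0 or c == n - 1):
--             return None
--         if r == 0:
--             return rule[c - 1]
--         if c == n - 1:
--             return rule[k + r - 1]
--         if r == n - 1:
--             return rule[3 * k - c]
--         if c == 0: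
--             return rule[4 * k - r]
--         return old
--
--     return [[cell(r, c, v) if c < n else v for c, v in enumerate(row)]
--             for r, row in enumerate(matrix[:n])] + matrix[n:]
-- ===== Notes on version B (the rewrite author's own statement) =====
-- stated objective: alternative
-- what changed: A mutates the matrix through a stateful spiral walk (four directional loops threading a shared rule counter with corner-membership tests); B rebuilds the matrix functionally in one cell-wise pass, computing each border cell's rule index by a closed-form formula from its coordinates alone, with no counter, no walk and no mutation.
import Mathlib
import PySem

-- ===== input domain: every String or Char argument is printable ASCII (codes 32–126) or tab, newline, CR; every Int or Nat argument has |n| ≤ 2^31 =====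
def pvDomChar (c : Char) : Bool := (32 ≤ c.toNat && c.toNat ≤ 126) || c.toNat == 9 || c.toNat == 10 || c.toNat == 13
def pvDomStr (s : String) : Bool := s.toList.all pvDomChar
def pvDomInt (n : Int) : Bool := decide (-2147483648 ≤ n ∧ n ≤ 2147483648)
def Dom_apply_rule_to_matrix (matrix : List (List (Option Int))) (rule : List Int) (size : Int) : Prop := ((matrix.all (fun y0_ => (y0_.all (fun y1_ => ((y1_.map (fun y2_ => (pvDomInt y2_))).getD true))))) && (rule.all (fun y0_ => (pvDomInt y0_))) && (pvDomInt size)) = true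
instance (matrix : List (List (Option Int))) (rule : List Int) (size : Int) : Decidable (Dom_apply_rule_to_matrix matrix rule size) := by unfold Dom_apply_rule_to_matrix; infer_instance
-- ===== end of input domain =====

-- B replaces A's stateful spiral walk (four loops threading a rule counter, with
-- corner-membership tests) by a functional cell-wise rebuild: each cell's value is a
-- closed-form function of its coordinates; objective: alternative.  The Python A mutates
-- `matrix` in place and returns it, the Python B builds a new list: the equivalence proved
-- here is about the return value only.

-- shared helper: Python 'matrix[r][c] = v' as a pure update (exact for the nonnegative
-- indices these programs use; the raising shapes are excluded by Pre_)
def set2 (m : List (List (Option Int))) (r c : Int) (v : Option Int) : List (List (Option Int)) :=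
  PySem.List.pySetD m r (PySem.List.pySetD (PySem.List.pyGetD m r []) c v)

-- ===== PORT A =====
def apply_rule_to_matrix (matrix : List (List (Option Int))) (rule : List Int) (size : Int) : List (List (Option Int)) :=
  let n : Int := size + 2          -- cols = rows = size + 2
  let corners : List (Int × Int) := [(0, 0), (0, n - 1), (n - 1, 0), (n - 1, n - 1)]
  -- top row: state (matrix, i)
  let s1 := (PySem.List.pyRange 0 n 1).foldl (fun (s : List (List (Option Int)) × Int) col =>
      if (0, col) ∈ corners then (set2 s.1 0 col none, s.2)
      else (set2 s.1 0 col (some (PySem.List.pyGetD rule s.2 0)), s.2 + 1)) (matrix, 0)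
  -- right column (the None branch writes matrix[cols-1][row], as A does)
  let s2 := (PySem.List.pyRange 1 n 1).foldl (fun (s : List (List (Option Int)) × Int) row =>
      if (n - 1, row) ∈ corners then (set2 s.1 (n - 1) row none, s.2)
      else (set2 s.1 row (n - 1) (some (PySem.List.pyGetD rule s.2 0)), s.2 + 1)) s1
  -- bottom row, right to left; Python's leftover `row` equals n-1 whenever this body runs
  -- (loop 2 is nonempty and ends at n-1 exactly when this range is nonempty), ported as n-1
  let s3 := (PySem.List.pyRange (n - 2) (-1) (-1)).foldl (fun (s : List (List (Option Int)) × Int) col =>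
      if (col, n - 1) ∈ corners then (set2 s.1 (n - 1) col none, s.2)
      else (set2 s.1 (n - 1) col (some (PySem.List.pyGetD rule s.2 0)), s.2 + 1)) s2
  -- left column, bottom to top; Python's leftover `col` equals 0 whenever this body runs
  let s4 := (PySem.List.pyRange (n - 2) 0 (-1)).foldl (fun (s : List (List (Option Int)) × Int) row =>
      if ((0 : Int), row) ∈ corners then (set2 s.1 row 0 none, s.2)
      else (set2 s.1 row 0 (some (PySem.List.pyGetD rule s.2 0)), s.2 + 1)) s3
  s4.1

-- ===== PORT B =====
-- Source B's nested `def cell(r, c, old)` (reads n, k, rule from the enclosing scope)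
def altCell (n k : Int) (rule : List Int) (r c : Int) (old : Option Int) : Option Int :=
  if (r = 0 ∨ r = n - 1) ∧ (c = 0 ∨ c = n - 1) then none
  else if r = 0 then some (PySem.List.pyGetD rule (c - 1) 0)
  else if c = n - 1 then some (PySem.List.pyGetD rule (k + r - 1) 0)
  else if r = n - 1 then some (PySem.List.pyGetD rule (3 * k - c) 0)
  else if c = 0 then some (PySem.List.pyGetD rule (4 * k - r) 0)
  else old

def apply_rule_to_matrix_alt (matrix : List (List (Option Int))) (rule : List Int) (size : Int) : List (List (Option Int)) :=
  let n : Int := size + 2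
  if n ≤ 0 then matrix
  else
    let k : Int := n - 2
    ((PySem.List.enumerate (PySem.List.slice matrix none (some n))).map (fun rrow =>
        (PySem.List.enumerate rrow.2).map (fun cv =>
          if cv.1 < n then altCell n k rule rrow.1 cv.1 cv.2 else cv.2)))
      ++ PySem.List.slice matrix (some n) none

-- ===== PRECONDITION & SPEC =====
-- Pre_ is exactly the set of inputs on which the Python A returns normally: with n = size+2,
-- A raises IndexError iff (n = 1 and matrix[0][0] is missing) or (n ≥ 2 and matrix has fewer
-- than n rows, one of its first n rows has fewer than n cells, or rule has fewer than
-- 4*(n-2) = 4*size entries); for n ≤ 0 every loop is empty and A always returns.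
def Pre_apply_rule_to_matrix (matrix : List (List (Option Int))) (rule : List Int) (size : Int) : Prop :=
  (size = -1 → matrix ≠ [] ∧ matrix.headD [] ≠ []) ∧
  (0 ≤ size → (size + 2).toNat ≤ matrix.length
      ∧ (∀ row ∈ matrix.take (size + 2).toNat, (size + 2).toNat ≤ row.length)
      ∧ 4 * size.toNat ≤ rule.length)
instance (matrix : List (List (Option Int))) (rule : List Int) (size : Int) : Decidable (Pre_apply_rule_to_matrix matrix rule size) := by unfold Pre_apply_rule_to_matrix; infer_instance

def pvWitness_apply_rule_to_matrix : List (List (Option Int)) × List Int × Int :=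
  ([[none, none, none], [none, none, none], [none, none, none]], [1, 2, 3, 4], 1)

def Spec_apply_rule_to_matrix (matrix : List (List (Option Int))) (rule : List Int) (size : Int) (out : List (List (Option Int))) : Prop := out = apply_rule_to_matrix_alt matrix rule size
instance (matrix : List (List (Option Int))) (rule : List Int) (size : Int) (out : List (List (Option Int))) : Decidable (Spec_apply_rule_to_matrix matrix rule size out) := by unfold Spec_apply_rule_to_matrix; infer_instance

-- ===== CLAIM (what is proved, stated in full; the proofs are below) =====
def Claim_equal_apply_rule_to_matrix : Prop := ∀ (matrix : List (List (Option Int))) (rule : List Int) (size : Int), Dom_apply_rule_to_matrix matrix rule size → Pre_apply_rule_to_matrix matrix rule size → Spec_apply_rule_to_matrix matrix rule size (apply_rule_to_matrix matrix rule size)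

-- ===== LEMMAS AND PROOFS =====

-- Python's 'm[r][c] = v' at Nat coordinates, in List.set normal form
def wr (m : List (List (Option Int))) (r c : Nat) (v : Option Int) : List (List (Option Int)) :=
  m.set r ((m.getD r []).set c v)

theorem set2_natCast (m : List (List (Option Int))) (r c : Nat) (v : Option Int) :
    set2 m (r : Int) (c : Int) v = wr m r c v := by
  simp [set2, wr, PySem.List.pySetD_natCast, PySem.List.pyGetD_natCast]

-- a sequence of writes, as data
def wrs (ws : List ((Nat × Nat) × Option Int)) (m : List (List (Option Int))) : List (List (Option Int)) :=
  ws.foldl (fun m p => wr m p.1.1 p.1.2 p.2) m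

-- reading cell (r, c)
def readM (m : List (List (Option Int))) (r c : Nat) : Option (Option Int) :=
  m[r]?.bind (fun row => row[c]?)

theorem wrs_cons (p : (Nat × Nat) × Option Int) (ws : List ((Nat × Nat) × Option Int))
    (m : List (List (Option Int))) : wrs (p :: ws) m = wrs ws (wr m p.1.1 p.1.2 p.2) := rfl

theorem wrs_append (X Y : List ((Nat × Nat) × Option Int)) (m : List (List (Option Int))) :
    wrs (X ++ Y) m = wrs Y (wrs X m) := by simp [wrs, List.foldl_append]

theorem length_wr (m : List (List (Option Int))) (r c : Nat) (v : Option Int) :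
    (wr m r c v).length = m.length := by simp [wr]

theorem rowlen_wr (m : List (List (Option Int))) (r c : Nat) (v : Option Int) (a : Nat) :
    ((wr m r c v).getD a []).length = (m.getD a []).length := by
  rcases eq_or_ne a r with rfl | hne
  · rcases Nat.lt_or_ge a m.length with h | h
    · simp [wr, List.getD_eq_getElem?_getD, h]
    · simp [wr, List.set_eq_of_length_le h]
  · simp [wr, List.getD_eq_getElem?_getD, List.getElem?_set_ne (Ne.symm hne)]

theorem read_wr (m : List (List (Option Int))) (r c : Nat) (v : Option Int) (a b : Nat) :
    readM (wr m r c v) a b =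
      if a = r ∧ b = c ∧ r < m.length ∧ c < (m.getD r []).length then some v
      else readM m a b := by
  rcases eq_or_ne a r with rfl | hne
  · rcases Nat.lt_or_ge a m.length with h | h
    · have hga : m.getD a [] = m[a] := by
        simp [List.getD_eq_getElem?_getD, List.getElem?_eq_getElem h]
      have hrow : (wr m a c v)[a]? = some ((m.getD a []).set c v) := by
        simp [wr, List.getElem?_set_self (by simpa using h)]
      have hm : m[a]? = some (m.getD a []) := by
        simp [List.getD_eq_getElem?_getD, List.getElem?_eq_getElem h]
      rcases eq_or_ne b c with rfl | hbc
      · rcases Nat.lt_or_ge b (m.getD a []).length with h2 | h2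
        · rw [if_pos ⟨rfl, rfl, h, h2⟩]
          simp only [readM, hrow, Option.bind_some]
          exact List.getElem?_set_self h2
        · rw [if_neg (by omega)]
          simp only [readM, hrow, hm, Option.bind_some]
          rw [List.set_eq_of_length_le h2]
      · rw [if_neg (by tauto)]
        simp only [readM, hrow, hm, Option.bind_some]
        exact List.getElem?_set_ne (Ne.symm hbc)
    · rw [if_neg (by omega)]
      simp [readM, wr, List.set_eq_of_length_le h]
  · rw [if_neg (by tauto)]
    simp [readM, wr, List.getElem?_set_ne (Ne.symm hne)]

theorem length_wrs (ws : List ((Nat × Nat) × Option Int)) :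
    ∀ m, (wrs ws m).length = m.length := by
  induction ws with
  | nil => intro m; rfl
  | cons p tl ih => intro m; simpa [wrs, List.foldl_cons, length_wr] using
      (ih (wr m p.1.1 p.1.2 p.2)).trans (length_wr m p.1.1 p.1.2 p.2)

theorem rowlen_wrs (ws : List ((Nat × Nat) × Option Int)) :
    ∀ m a, ((wrs ws m).getD a []).length = (m.getD a []).length := by
  induction ws with
  | nil => intro m a; rfl
  | cons p tl ih => intro m a; simpa [wrs, List.foldl_cons] using
      (ih (wr m p.1.1 p.1.2 p.2) a).trans (rowlen_wr m p.1.1 p.1.2 p.2 a)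

theorem readM_eq_none_iff (m : List (List (Option Int))) (a b : Nat) :
    readM m a b = none ↔ ¬ (a < m.length ∧ b < (m.getD a []).length) := by
  rcases Nat.lt_or_ge a m.length with h | h
  · have hm : m[a]? = some (m.getD a []) := by
      simp [List.getD_eq_getElem?_getD, List.getElem?_eq_getElem h]
    simp [readM, h]
  · simp [readM, Nat.not_lt.mpr h]

theorem readM_of_inRange (m : List (List (Option Int))) (a b : Nat)
    (h1 : a < m.length) (h2 : b < (m.getD a []).length) :
    readM m a b = some ((m.getD a []).getD b none) := by
  have hm : m[a]? = some (m.getD a []) := by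
    simp [List.getD_eq_getElem?_getD, List.getElem?_eq_getElem h1]
  rw [readM, hm, Option.bind_some, List.getElem?_eq_getElem h2, List.getD_eq_getElem _ _ h2]

theorem read_wrs_not (ws : List ((Nat × Nat) × Option Int)) (a b : Nat)
    (h : ∀ p ∈ ws, p.1 ≠ (a, b)) :
    ∀ m, readM (wrs ws m) a b = readM m a b := by
  induction ws with
  | nil => intro m; rfl
  | cons p tl ih =>
    intro m
    have hp := h p (List.mem_cons_self ..)
    have : readM (wr m p.1.1 p.1.2 p.2) a b = readM m a b := by
      rw [read_wr]
      rw [if_neg]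
      rintro ⟨rfl, rfl, -⟩
      exact hp rfl
    simpa [wrs, List.foldl_cons] using
      (ih (fun q hq => h q (List.mem_cons_of_mem _ hq)) (wr m p.1.1 p.1.2 p.2)).trans this

theorem read_wrs_none (ws : List ((Nat × Nat) × Option Int)) (m : List (List (Option Int)))
    (a b : Nat) (h : ¬ (a < m.length ∧ b < (m.getD a []).length)) :
    readM (wrs ws m) a b = none := by
  rw [readM_eq_none_iff, length_wrs, rowlen_wrs]
  exact h

theorem read_wrs_of_unique (a b : Nat) (v : Option Int) :
    ∀ (ws : List ((Nat × Nat) × Option Int)), ((a, b), v) ∈ ws →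
    (∀ p ∈ ws, p.1 = (a, b) → p.2 = v) →
    ∀ m, a < m.length → b < (m.getD a []).length → readM (wrs ws m) a b = some v := by
  intro ws
  induction ws with
  | nil => intro hv; exact absurd hv (by simp)
  | cons p tl ih =>
    intro hv huniq m h1 h2
    by_cases hkey : p.1 = (a, b)
    · have hval : p.2 = v := huniq p (List.mem_cons_self ..) hkey
      have h11 : p.1.1 = a := by rw [hkey]
      have h12 : p.1.2 = b := by rw [hkey]
      by_cases htl : ((a, b), v) ∈ tl
      · have := ih htl (fun q hq hq1 => huniq q (List.mem_cons_of_mem _ hq) hq1)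
          (wr m p.1.1 p.1.2 p.2) (by rwa [length_wr]) (by rwa [rowlen_wr])
        simpa [wrs, List.foldl_cons] using this
      · have hno : ∀ q ∈ tl, q.1 ≠ (a, b) := by
          intro q hq he
          exact htl (by
            have hv2 := huniq q (List.mem_cons_of_mem _ hq) he
            obtain ⟨q1, q2⟩ := q
            simp only at he hv2
            rw [← he, ← hv2]
            exact hq)
        have hn := read_wrs_not tl a b hno (wr m p.1.1 p.1.2 p.2)
        have hr : readM (wr m p.1.1 p.1.2 p.2) a b = some v := by
          rw [h11, h12, hval, read_wr, if_pos ⟨rfl, rfl, h1, h2⟩]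
        simpa [wrs, List.foldl_cons] using hn.trans hr
    · have htl : ((a, b), v) ∈ tl := by
        rcases List.mem_cons.mp hv with he | htl
        · exact absurd (by rw [← he]) hkey
        · exact htl
      have := ih htl (fun q hq hq1 => huniq q (List.mem_cons_of_mem _ hq) hq1)
        (wr m p.1.1 p.1.2 p.2) (by rwa [length_wr]) (by rwa [rowlen_wr])
      simpa [wrs, List.foldl_cons] using this

-- the full write sequence of A for size = k ≥ 0, in A's exact order
def allW (k : Nat) (rule : List Int) : List ((Nat × Nat) × Option Int) :=
  (((0, 0), none) : (Nat × Nat) × Option Int)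
    :: (List.range k).map (fun j => (((0 : Nat), j + 1), some (rule.getD j 0)))
    ++ (((0, k + 1), none) : (Nat × Nat) × Option Int)
    :: (List.range k).map (fun j => ((j + 1, k + 1), some (rule.getD (k + j) 0)))
    ++ (((k + 1, k + 1), none) : (Nat × Nat) × Option Int)
    :: (List.range k).map (fun j => ((k + 1, k - j), some (rule.getD (k + k + j) 0)))
    ++ (((k + 1, 0), none) : (Nat × Nat) × Option Int)
    :: (List.range k).map (fun j => ((k - j, 0), some (rule.getD (k + k + k + j) 0)))

theorem mem_allW (k : Nat) (rule : List Int) (p : (Nat × Nat) × Option Int) :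
    p ∈ allW k rule ↔
      p = ((0, 0), none) ∨ p = ((0, k + 1), none) ∨ p = ((k + 1, k + 1), none) ∨ p = ((k + 1, 0), none)
      ∨ (∃ j < k, p = ((0, j + 1), some (rule.getD j 0)))
      ∨ (∃ j < k, p = ((j + 1, k + 1), some (rule.getD (k + j) 0)))
      ∨ (∃ j < k, p = ((k + 1, k - j), some (rule.getD (k + k + j) 0)))
      ∨ (∃ j < k, p = ((k - j, 0), some (rule.getD (k + k + k + j) 0))) := by
  simp only [allW, List.cons_append, List.mem_cons, List.mem_append, List.mem_map, List.mem_range]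
  constructor
  · rintro (rfl | ((⟨j, hj, rfl⟩ | rfl | ⟨j, hj, rfl⟩) | rfl | ⟨j, hj, rfl⟩) | rfl | ⟨j, hj, rfl⟩)
    · tauto
    · exact Or.inr (Or.inr (Or.inr (Or.inr (Or.inl ⟨j, hj, rfl⟩))))
    · tauto
    · exact Or.inr (Or.inr (Or.inr (Or.inr (Or.inr (Or.inl ⟨j, hj, rfl⟩)))))
    · tauto
    · exact Or.inr (Or.inr (Or.inr (Or.inr (Or.inr (Or.inr (Or.inl ⟨j, hj, rfl⟩))))))
    · tauto
    · exact Or.inr (Or.inr (Or.inr (Or.inr (Or.inr (Or.inr (Or.inr ⟨j, hj, rfl⟩))))))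
  · rintro (rfl | rfl | rfl | rfl | ⟨j, hj, rfl⟩ | ⟨j, hj, rfl⟩ | ⟨j, hj, rfl⟩ | ⟨j, hj, rfl⟩)
    · tauto
    · tauto
    · tauto
    · tauto
    · exact Or.inr (Or.inl (Or.inl (Or.inl ⟨j, hj, rfl⟩)))
    · exact Or.inr (Or.inl (Or.inl (Or.inr (Or.inr ⟨j, hj, rfl⟩))))
    · exact Or.inr (Or.inl (Or.inr (Or.inr ⟨j, hj, rfl⟩)))
    · exact Or.inr (Or.inr (Or.inr ⟨j, hj, rfl⟩))

-- a counter-driven fold over 'range k' is the corresponding write list with direct indices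
theorem counter_fold_range (rule : List Int) (g : Nat → Nat × Nat) (k i0 : Nat)
    (m : List (List (Option Int))) :
    (List.range k).foldl (fun (s : List (List (Option Int)) × Int) j =>
        (wr s.1 (g j).1 (g j).2 (some (PySem.List.pyGetD rule s.2 0)), s.2 + 1)) (m, ((i0 : Nat) : Int))
      = (wrs ((List.range k).map (fun j => (g j, some (rule.getD (i0 + j) 0)))) m,
         ((i0 + k : Nat) : Int)) := by
  induction k with
  | zero => simp [wrs]
  | succ k ih =>
    rw [List.range_succ, List.foldl_append, ih]
    simp only [List.foldl_cons, List.foldl_nil, List.map_append, List.map_cons, List.map_nil]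
    rw [show ((i0 + k : Nat) : Int) = (((i0 + k : Nat)) : Int) from rfl]
    rw [PySem.List.pyGetD_natCast]
    refine Prod.ext ?_ ?_
    · simp [wrs, List.foldl_append]
    · push_cast; ring

theorem set2_toNat (m : List (List (Option Int))) (r c : Int) (hr : 0 ≤ r) (hc : 0 ≤ c)
    (v : Option Int) : set2 m r c v = wr m r.toNat c.toNat v := by
  obtain ⟨a, rfl⟩ := Int.eq_ofNat_of_zero_le hr
  obtain ⟨b, rfl⟩ := Int.eq_ofNat_of_zero_le hc
  simpa using set2_natCast m a b v

set_option maxHeartbeats 1000000 in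
theorem A_writes (matrix : List (List (Option Int))) (rule : List Int) (k : Nat) :
    apply_rule_to_matrix matrix rule (k : Int) = wrs (allW k rule) matrix := by
  have hA1 : ((k : Int) + 2) - 1 = (k : Int) + 1 := by ring
  have hA2 : ((k : Int) + 2) - 2 = (k : Int) := by ring
  -- range decompositions
  have eTop : PySem.List.pyRange 0 ((k : Int) + 2) 1
      = 0 :: ((PySem.List.pyRange 1 ((k : Int) + 1) 1) ++ [(k : Int) + 1]) := by
    rw [PySem.List.pyRange_one_cons (by omega)]
    rw [show (0 : Int) + 1 = 1 by ring]
    rw [PySem.List.pyRange_one_append 1 ((k : Int) + 1) ((k : Int) + 2) (by omega) (by omega)]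
    rw [show ((k : Int) + 2) = ((k : Int) + 1) + 1 by ring]
    rw [PySem.List.pyRange_one_singleton]
  have eRight : PySem.List.pyRange 1 ((k : Int) + 2) 1
      = (PySem.List.pyRange 1 ((k : Int) + 1) 1) ++ [(k : Int) + 1] := by
    rw [PySem.List.pyRange_one_append 1 ((k : Int) + 1) ((k : Int) + 2) (by omega) (by omega)]
    rw [show ((k : Int) + 2) = ((k : Int) + 1) + 1 by ring]
    rw [PySem.List.pyRange_one_singleton]
  have eBot : PySem.List.pyRange ((k : Int)) (-1) (-1)
      = (PySem.List.pyRange ((k : Int)) 0 (-1)) ++ [0] := by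
    rw [PySem.List.pyRange_neg_one_eq_reverse, PySem.List.pyRange_neg_one_eq_reverse]
    rw [show ((-1 : Int) + 1) = 0 by ring, show ((0 : Int) + 1) = 1 by ring]
    rw [PySem.List.pyRange_one_cons (show (0 : Int) < (k : Int) + 1 by omega)]
    rw [show (0 : Int) + 1 = 1 by ring]
    simp
  have eIntUp : PySem.List.pyRange 1 ((k : Int) + 1) 1
      = (List.range k).map (fun (j : Nat) => 1 + (j : Int)) := by
    rw [PySem.List.pyRange_one]
    simp only [show ((k : Int) + 1 - 1) = (k : Int) by ring, Int.toNat_natCast]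
  have eIntDown : PySem.List.pyRange ((k : Int)) 0 (-1)
      = (List.range k).map (fun (j : Nat) => (k : Int) - (j : Int)) := by
    rw [PySem.List.pyRange_neg_one]
    simp only [show ((k : Int) - 0) = (k : Int) by ring, Int.toNat_natCast]
  -- the four interior folds, via counter_fold_range
  have L1 : ∀ (m : List (List (Option Int))) (i0 : Nat),
      List.foldl (fun (s : List (List (Option Int)) × Int) col =>
          if ((0 : Int), col) ∈ [((0 : Int), (0 : Int)), (0, (k : Int) + 1), ((k : Int) + 1, 0), ((k : Int) + 1, (k : Int) + 1)]
          then (set2 s.1 0 col none, s.2)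
          else (set2 s.1 0 col (some (PySem.List.pyGetD rule s.2 0)), s.2 + 1))
        (m, ((i0 : Nat) : Int)) (PySem.List.pyRange 1 ((k : Int) + 1) 1)
      = (wrs ((List.range k).map (fun j => (((0 : Nat), j + 1), some (rule.getD (i0 + j) 0)))) m,
         ((i0 + k : Nat) : Int)) := by
    intro m i0
    rw [eIntUp, List.foldl_map]
    rw [PySem.List.foldl_congr_mem _ _
      (fun (s : List (List (Option Int)) × Int) j =>
        (wr s.1 ((fun j => ((0 : Nat), j + 1)) j).1 ((fun j => ((0 : Nat), j + 1)) j).2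
          (some (PySem.List.pyGetD rule s.2 0)), s.2 + 1)) _
      (by
        intro s j hj
        rw [List.mem_range] at hj
        rw [if_neg (by
          simp only [List.mem_cons, Prod.mk.injEq, List.mem_nil_iff, true_and, or_false]
          omega)]
        rw [set2_toNat s.1 0 (1 + (j : Int)) (by omega) (by omega)]
        norm_num [show ((1 : Int) + (j : Int)).toNat = j + 1 by omega])]
    exact counter_fold_range rule (fun j => ((0 : Nat), j + 1)) k i0 m
  have L2 : ∀ (m : List (List (Option Int))) (i0 : Nat),
      List.foldl (fun (s : List (List (Option Int)) × Int) row =>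
          if ((k : Int) + 1, row) ∈ [((0 : Int), (0 : Int)), (0, (k : Int) + 1), ((k : Int) + 1, 0), ((k : Int) + 1, (k : Int) + 1)]
          then (set2 s.1 ((k : Int) + 1) row none, s.2)
          else (set2 s.1 row ((k : Int) + 1) (some (PySem.List.pyGetD rule s.2 0)), s.2 + 1))
        (m, ((i0 : Nat) : Int)) (PySem.List.pyRange 1 ((k : Int) + 1) 1)
      = (wrs ((List.range k).map (fun j => ((j + 1, k + 1), some (rule.getD (i0 + j) 0)))) m,
         ((i0 + k : Nat) : Int)) := by
    intro m i0
    rw [eIntUp, List.foldl_map]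
    rw [PySem.List.foldl_congr_mem _ _
      (fun (s : List (List (Option Int)) × Int) j =>
        (wr s.1 ((fun j => (j + 1, k + 1)) j).1 ((fun j => (j + 1, k + 1)) j).2
          (some (PySem.List.pyGetD rule s.2 0)), s.2 + 1)) _
      (by
        intro s j hj
        rw [List.mem_range] at hj
        rw [if_neg (by
          simp only [List.mem_cons, Prod.mk.injEq, List.mem_nil_iff, true_and, or_false]
          omega)]
        rw [set2_toNat s.1 (1 + (j : Int)) ((k : Int) + 1) (by omega) (by omega)]
        norm_num [show ((1 : Int) + (j : Int)).toNat = j + 1 by omega,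
          show (((k : Int)) + 1).toNat = k + 1 by omega])]
    exact counter_fold_range rule (fun j => (j + 1, k + 1)) k i0 m
  have L3 : ∀ (m : List (List (Option Int))) (i0 : Nat),
      List.foldl (fun (s : List (List (Option Int)) × Int) col =>
          if (col, (k : Int) + 1) ∈ [((0 : Int), (0 : Int)), (0, (k : Int) + 1), ((k : Int) + 1, 0), ((k : Int) + 1, (k : Int) + 1)]
          then (set2 s.1 ((k : Int) + 1) col none, s.2)
          else (set2 s.1 ((k : Int) + 1) col (some (PySem.List.pyGetD rule s.2 0)), s.2 + 1))
        (m, ((i0 : Nat) : Int)) (PySem.List.pyRange ((k : Int)) 0 (-1))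
      = (wrs ((List.range k).map (fun j => ((k + 1, k - j), some (rule.getD (i0 + j) 0)))) m,
         ((i0 + k : Nat) : Int)) := by
    intro m i0
    rw [eIntDown, List.foldl_map]
    rw [PySem.List.foldl_congr_mem _ _
      (fun (s : List (List (Option Int)) × Int) j =>
        (wr s.1 ((fun j => (k + 1, k - j)) j).1 ((fun j => (k + 1, k - j)) j).2
          (some (PySem.List.pyGetD rule s.2 0)), s.2 + 1)) _
      (by
        intro s j hj
        rw [List.mem_range] at hj
        rw [if_neg (by
          simp only [List.mem_cons, Prod.mk.injEq, List.mem_nil_iff, or_false]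
          omega)]
        rw [set2_toNat s.1 ((k : Int) + 1) ((k : Int) - (j : Int)) (by omega) (by omega)]
        norm_num [show (((k : Int)) + 1).toNat = k + 1 by omega,
          show (((k : Int)) - (j : Int)).toNat = k - j by omega])]
    exact counter_fold_range rule (fun j => (k + 1, k - j)) k i0 m
  have L4 : ∀ (m : List (List (Option Int))) (i0 : Nat),
      List.foldl (fun (s : List (List (Option Int)) × Int) row =>
          if ((0 : Int), row) ∈ [((0 : Int), (0 : Int)), (0, (k : Int) + 1), ((k : Int) + 1, 0), ((k : Int) + 1, (k : Int) + 1)]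
          then (set2 s.1 row 0 none, s.2)
          else (set2 s.1 row 0 (some (PySem.List.pyGetD rule s.2 0)), s.2 + 1))
        (m, ((i0 : Nat) : Int)) (PySem.List.pyRange ((k : Int)) 0 (-1))
      = (wrs ((List.range k).map (fun j => ((k - j, (0 : Nat)), some (rule.getD (i0 + j) 0)))) m,
         ((i0 + k : Nat) : Int)) := by
    intro m i0
    rw [eIntDown, List.foldl_map]
    rw [PySem.List.foldl_congr_mem _ _
      (fun (s : List (List (Option Int)) × Int) j =>
        (wr s.1 ((fun j => (k - j, (0 : Nat))) j).1 ((fun j => (k - j, (0 : Nat))) j).2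
          (some (PySem.List.pyGetD rule s.2 0)), s.2 + 1)) _
      (by
        intro s j hj
        rw [List.mem_range] at hj
        rw [if_neg (by
          simp only [List.mem_cons, Prod.mk.injEq, List.mem_nil_iff, true_and, or_false]
          omega)]
        rw [set2_toNat s.1 ((k : Int) - (j : Int)) 0 (by omega) (by omega)]
        norm_num [show (((k : Int)) - (j : Int)).toNat = k - j by omega])]
    exact counter_fold_range rule (fun j => (k - j, (0 : Nat))) k i0 m
  -- corner writes as wr
  have c00 : ∀ m, set2 m 0 0 (none : Option Int) = wr m 0 0 none := by
    intro m
    simpa using set2_toNat m 0 0 (by omega) (by omega) none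
  have c0k : ∀ m, set2 m 0 ((k : Int) + 1) (none : Option Int) = wr m 0 (k + 1) none := by
    intro m
    have := set2_toNat m 0 ((k : Int) + 1) (by omega) (by omega) (none : Option Int)
    simpa [show (((k : Int)) + 1).toNat = k + 1 by omega] using this
  have ckk : ∀ m, set2 m ((k : Int) + 1) ((k : Int) + 1) (none : Option Int) = wr m (k + 1) (k + 1) none := by
    intro m
    have := set2_toNat m ((k : Int) + 1) ((k : Int) + 1) (by omega) (by omega) (none : Option Int)
    simpa [show (((k : Int)) + 1).toNat = k + 1 by omega] using this
  have ck0 : ∀ m, set2 m ((k : Int) + 1) 0 (none : Option Int) = wr m (k + 1) 0 none := by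
    intro m
    have := set2_toNat m ((k : Int) + 1) 0 (by omega) (by omega) (none : Option Int)
    simpa [show (((k : Int)) + 1).toNat = k + 1 by omega] using this
  -- whole loops including their corner steps
  have F1 : List.foldl (fun (s : List (List (Option Int)) × Int) col =>
          if ((0 : Int), col) ∈ [((0 : Int), (0 : Int)), (0, (k : Int) + 1), ((k : Int) + 1, 0), ((k : Int) + 1, (k : Int) + 1)]
          then (set2 s.1 0 col none, s.2)
          else (set2 s.1 0 col (some (PySem.List.pyGetD rule s.2 0)), s.2 + 1))
        (matrix, (0 : Int)) (PySem.List.pyRange 0 ((k : Int) + 2) 1)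
      = (wrs ((((0 : Nat), (0 : Nat)), (none : Option Int))
            :: (List.range k).map (fun j => (((0 : Nat), j + 1), some (rule.getD j 0)))
            ++ [(((0 : Nat), k + 1), (none : Option Int))]) matrix, ((k : Nat) : Int)) := by
    rw [eTop]
    simp only [List.foldl_cons, List.foldl_append, List.foldl_nil]
    rw [if_pos (show ((0 : Int), (0 : Int)) ∈ _ by simp)]
    rw [c00]
    have h1 := L1 (wr matrix 0 0 none) 0
    simp only [Nat.cast_zero, Nat.zero_add] at h1
    rw [h1]
    rw [if_pos (show ((0 : Int), (k : Int) + 1) ∈ _ by simp)]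
    rw [c0k]
    simp only [wrs_append, wrs_cons]
    rfl
  have F2 : ∀ m, List.foldl (fun (s : List (List (Option Int)) × Int) row =>
          if ((k : Int) + 1, row) ∈ [((0 : Int), (0 : Int)), (0, (k : Int) + 1), ((k : Int) + 1, 0), ((k : Int) + 1, (k : Int) + 1)]
          then (set2 s.1 ((k : Int) + 1) row none, s.2)
          else (set2 s.1 row ((k : Int) + 1) (some (PySem.List.pyGetD rule s.2 0)), s.2 + 1))
        (m, ((k : Nat) : Int)) (PySem.List.pyRange 1 ((k : Int) + 2) 1)
      = (wrs ((List.range k).map (fun j => ((j + 1, k + 1), some (rule.getD (k + j) 0)))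
            ++ [((k + 1, k + 1), (none : Option Int))]) m, ((k + k : Nat) : Int)) := by
    intro m
    rw [eRight]
    simp only [List.foldl_append, List.foldl_cons, List.foldl_nil]
    rw [L2 m k]
    rw [if_pos (show ((k : Int) + 1, (k : Int) + 1) ∈ _ by simp)]
    rw [ckk]
    rw [wrs_append]
    rfl
  have F3 : ∀ m, List.foldl (fun (s : List (List (Option Int)) × Int) col =>
          if (col, (k : Int) + 1) ∈ [((0 : Int), (0 : Int)), (0, (k : Int) + 1), ((k : Int) + 1, 0), ((k : Int) + 1, (k : Int) + 1)]
          then (set2 s.1 ((k : Int) + 1) col none, s.2)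
          else (set2 s.1 ((k : Int) + 1) col (some (PySem.List.pyGetD rule s.2 0)), s.2 + 1))
        (m, ((k + k : Nat) : Int)) (PySem.List.pyRange ((k : Int)) (-1) (-1))
      = (wrs ((List.range k).map (fun j => ((k + 1, k - j), some (rule.getD (k + k + j) 0)))
            ++ [((k + 1, (0 : Nat)), (none : Option Int))]) m, ((k + k + k : Nat) : Int)) := by
    intro m
    rw [eBot]
    simp only [List.foldl_append, List.foldl_cons, List.foldl_nil]
    rw [L3 m (k + k)]
    rw [if_pos (show ((0 : Int), (k : Int) + 1) ∈ _ by simp)]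
    rw [ck0]
    rw [wrs_append]
    rfl
  -- assemble
  simp only [apply_rule_to_matrix, hA1, hA2]
  rw [F1, F2, F3, L4 _ (k + k + k)]
  simp only [allW, wrs_cons, wrs_append, List.cons_append]
  rfl

-- the value A writes at border cell (r, c), as a function of the coordinates
def valAt (k : Nat) (rule : List Int) (r c : Nat) : Option Int :=
  if (r = 0 ∨ r = k + 1) ∧ (c = 0 ∨ c = k + 1) then none
  else if r = 0 then some (rule.getD (c - 1) 0)
  else if c = k + 1 then some (rule.getD (k + r - 1) 0)
  else if r = k + 1 then some (rule.getD (3 * k - c) 0)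
  else some (rule.getD (4 * k - r) 0)

theorem allW_value (k : Nat) (rule : List Int) (p : (Nat × Nat) × Option Int)
    (hp : p ∈ allW k rule) : p.2 = valAt k rule p.1.1 p.1.2 := by
  rw [mem_allW] at hp
  rcases hp with rfl | rfl | rfl | rfl | ⟨j, hj, rfl⟩ | ⟨j, hj, rfl⟩ | ⟨j, hj, rfl⟩ | ⟨j, hj, rfl⟩ <;>
    · simp only [valAt]
      split_ifs <;>
        first
          | rfl
          | (exfalso; omega)
          | (exfalso; tauto)
          | (refine congrArg (fun t => some (rule.getD t 0)) ?_; omega)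

theorem allW_key_border (k : Nat) (rule : List Int) (p : (Nat × Nat) × Option Int)
    (hp : p ∈ allW k rule) :
    p.1.1 ≤ k + 1 ∧ p.1.2 ≤ k + 1 ∧ (p.1.1 = 0 ∨ p.1.1 = k + 1 ∨ p.1.2 = 0 ∨ p.1.2 = k + 1) := by
  rw [mem_allW] at hp
  rcases hp with rfl | rfl | rfl | rfl | ⟨j, hj, rfl⟩ | ⟨j, hj, rfl⟩ | ⟨j, hj, rfl⟩ | ⟨j, hj, rfl⟩ <;>
    simp <;> omega

-- the cell (r, c) carries a write exactly when it is on the border of the (k+2)-square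
theorem mem_allW_key (k : Nat) (rule : List Int) (r c : Nat)
    (hr : r ≤ k + 1) (hc : c ≤ k + 1) (hb : r = 0 ∨ r = k + 1 ∨ c = 0 ∨ c = k + 1) :
    ((r, c), valAt k rule r c) ∈ allW k rule := by
  rw [mem_allW]
  by_cases hcor : (r = 0 ∨ r = k + 1) ∧ (c = 0 ∨ c = k + 1)
  · have hv : valAt k rule r c = none := by simp only [valAt]; rw [if_pos hcor]
    rw [hv]
    rcases hcor with ⟨rfl | rfl, rfl | rfl⟩
    · tauto
    · tauto
    · tauto
    · tauto
  · rcases hb with rfl | rfl | rfl | rfl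
    · -- top edge, 1 ≤ c ≤ k
      have hcc : 1 ≤ c ∧ c ≤ k := by omega
      have hv : valAt k rule 0 c = some (rule.getD (c - 1) 0) := by
        simp only [valAt]
        split_ifs <;> first | (exfalso; omega) | (exfalso; tauto) | (refine congrArg (fun t => some (rule.getD t 0)) ?_; omega)
      rw [hv]
      refine Or.inr (Or.inr (Or.inr (Or.inr (Or.inl ⟨c - 1, by omega, ?_⟩))))
      rw [show c - 1 + 1 = c by omega]
    · -- bottom edge, 1 ≤ c ≤ k
      have hcc : 1 ≤ c ∧ c ≤ k := by omega
      have hv : valAt k rule (k + 1) c = some (rule.getD (k + k + (k - c)) 0) := by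
        simp only [valAt]
        split_ifs <;> first | (exfalso; omega) | (exfalso; tauto) | (refine congrArg (fun t => some (rule.getD t 0)) ?_; omega)
      rw [hv]
      refine Or.inr (Or.inr (Or.inr (Or.inr (Or.inr (Or.inr (Or.inl ⟨k - c, by omega, ?_⟩))))))
      rw [show k - (k - c) = c by omega]
    · -- left edge, 1 ≤ r ≤ k
      have hrr : 1 ≤ r ∧ r ≤ k := by omega
      have hv : valAt k rule r 0 = some (rule.getD (k + k + k + (k - r)) 0) := by
        simp only [valAt]
        split_ifs <;> first | (exfalso; omega) | (exfalso; tauto) | (refine congrArg (fun t => some (rule.getD t 0)) ?_; omega)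
      rw [hv]
      refine Or.inr (Or.inr (Or.inr (Or.inr (Or.inr (Or.inr (Or.inr ⟨k - r, by omega, ?_⟩))))))
      rw [show k - (k - r) = r by omega]
    · -- right edge, 1 ≤ r ≤ k
      have hrr : 1 ≤ r ∧ r ≤ k := by omega
      have hv : valAt k rule r (k + 1) = some (rule.getD (k + (r - 1)) 0) := by
        simp only [valAt]
        split_ifs <;> first | (exfalso; omega) | (exfalso; tauto) | (refine congrArg (fun t => some (rule.getD t 0)) ?_; omega)
      rw [hv]
      refine Or.inr (Or.inr (Or.inr (Or.inr (Or.inr (Or.inl ⟨r - 1, by omega, ?_⟩)))))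
      rw [show r - 1 + 1 = r by omega]

theorem read_allW (k : Nat) (rule : List Int) (matrix : List (List (Option Int))) (r c : Nat)
    (hr : r ≤ k + 1) (hc : c ≤ k + 1) (hb : r = 0 ∨ r = k + 1 ∨ c = 0 ∨ c = k + 1)
    (h1 : r < matrix.length) (h2 : c < (matrix.getD r []).length) :
    readM (wrs (allW k rule) matrix) r c = some (valAt k rule r c) := by
  refine read_wrs_of_unique r c _ _ (mem_allW_key k rule r c hr hc hb) ?_ matrix h1 h2
  intro p hp hkey
  rw [allW_value k rule p hp, hkey]

theorem read_allW_off (k : Nat) (rule : List Int) (matrix : List (List (Option Int))) (r c : Nat)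
    (hb : ¬ (r ≤ k + 1 ∧ c ≤ k + 1 ∧ (r = 0 ∨ r = k + 1 ∨ c = 0 ∨ c = k + 1))) :
    readM (wrs (allW k rule) matrix) r c = readM matrix r c := by
  refine read_wrs_not _ _ _ ?_ matrix
  intro p hp he
  have := allW_key_border k rule p hp
  rw [he] at this
  exact hb this

-- B's rows: getElem? characterization
theorem enum_map_getElem? (row : List (Option Int)) (g : Int × Option Int → Option Int) (c : Nat) :
    ((PySem.List.enumerate row).map g)[c]? = row[c]?.map (fun v => g ((c : Int), v)) := by
  rw [List.getElem?_map, PySem.List.getElem?_enumerate]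
  cases row[c]? <;> simp

theorem alt_row (matrix : List (List (Option Int))) (rule : List Int) (size : Int) (N : Nat)
    (hN : size + 2 = (N : Int)) (hpos : 1 ≤ N) (r : Nat) :
    (apply_rule_to_matrix_alt matrix rule size)[r]? =
      matrix[r]?.map (fun row => if r < N then
        (PySem.List.enumerate row).map (fun cv =>
          if cv.1 < (N : Int) then altCell (N : Int) ((N : Int) - 2) rule (r : Int) cv.1 cv.2 else cv.2)
        else row) := by
  simp only [apply_rule_to_matrix_alt, hN]
  rw [if_neg (by omega)]
  rw [PySem.List.slice_to_natCast, PySem.List.slice_from_natCast]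
  by_cases h1 : r < N
  · by_cases h2 : r < matrix.length
    · rw [List.getElem?_append_left (by
        simp only [List.length_map, PySem.List.length_enumerate, List.length_take]
        omega)]
      rw [List.getElem?_map, PySem.List.getElem?_enumerate, List.getElem?_take_of_lt h1]
      rw [List.getElem?_eq_getElem h2]
      simp [h1]
    · have hlen : matrix.length ≤ r := by omega
      rw [List.getElem?_append_right (by
        simp only [List.length_map, PySem.List.length_enumerate, List.length_take]
        omega)]
      rw [List.drop_eq_nil_of_le (by omega)]
      rw [show matrix[r]? = none from List.getElem?_eq_none_iff.mpr hlen]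
      simp
  · have hmin : min N matrix.length ≤ r := by omega
    rw [List.getElem?_append_right (by
      simp only [List.length_map, PySem.List.length_enumerate, List.length_take]
      omega)]
    simp only [List.length_map, PySem.List.length_enumerate, List.length_take]
    by_cases h2 : N ≤ matrix.length
    · rw [List.getElem?_drop]
      rw [show N + (r - min N matrix.length) = r by omega]
      cases hm : matrix[r]? <;> simp [h1]
    · rw [List.drop_eq_nil_of_le (by omega)]
      rw [List.getElem?_eq_none_iff.mpr (by simp)]
      rw [List.getElem?_eq_none_iff.mpr (by omega)]
      simp
  
theorem alt_read (matrix : List (List (Option Int))) (rule : List Int) (size : Int) (N : Nat)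
    (hN : size + 2 = (N : Int)) (hpos : 1 ≤ N) (r c : Nat) :
    readM (apply_rule_to_matrix_alt matrix rule size) r c =
      (readM matrix r c).map (fun v =>
        if r < N ∧ c < N then altCell (N : Int) ((N : Int) - 2) rule (r : Int) (c : Int) v else v) := by
  rw [readM, alt_row matrix rule size N hN hpos r]
  cases hm : matrix[r]? with
  | none => simp [readM, hm]
  | some row =>
    simp only [Option.map_some, Option.bind_some, readM, hm]
    by_cases h1 : r < N
    · rw [if_pos h1, enum_map_getElem?]
      cases row[c]? with
      | none => simp
      | some v =>
        simp only [Option.map_some]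
        by_cases h2 : c < N
        · rw [if_pos (by exact_mod_cast (by omega : (c : Int) < (N : Int))), if_pos ⟨h1, h2⟩]
        · rw [if_neg (by omega), if_neg (by tauto)]
    · rw [if_neg h1]
      cases row[c]? <;> simp [h1]

theorem length_alt (matrix : List (List (Option Int))) (rule : List Int) (size : Int) (N : Nat)
    (hN : size + 2 = (N : Int)) (hpos : 1 ≤ N) :
    (apply_rule_to_matrix_alt matrix rule size).length = matrix.length := by
  simp only [apply_rule_to_matrix_alt, hN]
  rw [if_neg (by omega)]
  rw [PySem.List.slice_to_natCast, PySem.List.slice_from_natCast]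
  simp only [List.length_append, List.length_map, PySem.List.length_enumerate, List.length_take,
    List.length_drop]
  omega

theorem eq_of_read (m1 m2 : List (List (Option Int))) (hlen : m1.length = m2.length)
    (h : ∀ r c : Nat, readM m1 r c = readM m2 r c) : m1 = m2 := by
  apply List.ext_getElem?
  intro r
  cases hm : m1[r]? with
  | none =>
    rw [List.getElem?_eq_none_iff.mpr]
    rw [← hlen]
    exact List.getElem?_eq_none_iff.mp hm
  | some row1 =>
    have hr1 : r < m1.length := by
      by_contra hcon
      have hnone := List.getElem?_eq_none_iff.mpr (show m1.length ≤ r by omega)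
      rw [hm] at hnone
      simp at hnone
    have hr2 : r < m2.length := by omega
    cases hm2 : m2[r]? with
    | none =>
      rw [List.getElem?_eq_none_iff] at hm2
      omega
    | some row2 =>
      congr 1
      apply List.ext_getElem?
      intro c
      have := h r c
      rw [readM, readM, hm, hm2] at this
      simpa using this

theorem c00' (m : List (List (Option Int))) : set2 m 0 0 (none : Option Int) = wr m 0 0 none := by
  simpa using set2_toNat m 0 0 (by omega) (by omega) none

theorem valAt_eq_altCell (k : Nat) (rule : List Int) (r c : Nat) (hr : r ≤ k + 1) (hc : c ≤ k + 1)
    (hb : r = 0 ∨ r = k + 1 ∨ c = 0 ∨ c = k + 1) (w : Option Int) :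
    valAt k rule r c
      = altCell (((k + 2 : Nat)) : Int) ((((k + 2 : Nat)) : Int) - 2) rule (r : Int) (c : Int) w := by
  simp only [valAt, altCell]
  by_cases h1 : (r = 0 ∨ r = k + 1) ∧ (c = 0 ∨ c = k + 1)
  · rw [if_pos h1,
      if_pos (show ((r : Int) = 0 ∨ (r : Int) = ((k + 2 : Nat) : Int) - 1)
        ∧ ((c : Int) = 0 ∨ (c : Int) = ((k + 2 : Nat) : Int) - 1) by push_cast; omega)]
  · rw [if_neg h1,
      if_neg (show ¬ (((r : Int) = 0 ∨ (r : Int) = ((k + 2 : Nat) : Int) - 1)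
        ∧ ((c : Int) = 0 ∨ (c : Int) = ((k + 2 : Nat) : Int) - 1)) by push_cast; omega)]
    by_cases h2 : r = 0
    · rw [if_pos h2, if_pos (show (r : Int) = 0 by omega)]
      have hc1 : 1 ≤ c := by omega
      rw [show (c : Int) - 1 = (((c - 1 : Nat)) : Int) by omega, PySem.List.pyGetD_natCast]
    · rw [if_neg h2, if_neg (show ¬ (r : Int) = 0 by omega)]
      by_cases h3 : c = k + 1
      · rw [if_pos h3, if_pos (show (c : Int) = ((k + 2 : Nat) : Int) - 1 by push_cast; omega)]
        have hr1 : 1 ≤ r := by omega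
        rw [show (((k + 2 : Nat)) : Int) - 2 + (r : Int) - 1 = (((k + r - 1 : Nat)) : Int) by push_cast; omega,
          PySem.List.pyGetD_natCast]
      · rw [if_neg h3, if_neg (show ¬ (c : Int) = ((k + 2 : Nat) : Int) - 1 by push_cast; omega)]
        by_cases h4 : r = k + 1
        · rw [if_pos h4, if_pos (show (r : Int) = ((k + 2 : Nat) : Int) - 1 by push_cast; omega)]
          have hcc : 1 ≤ c ∧ c ≤ k := by omega
          rw [show 3 * ((((k + 2 : Nat)) : Int) - 2) - (c : Int) = (((3 * k - c : Nat)) : Int) by push_cast; omega,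
            PySem.List.pyGetD_natCast]
        · rw [if_neg h4, if_neg (show ¬ (r : Int) = ((k + 2 : Nat) : Int) - 1 by push_cast; omega)]
          have hc0 : c = 0 := by omega
          have hrr : 1 ≤ r ∧ r ≤ k := by omega
          rw [if_pos (show (c : Int) = 0 by omega)]
          rw [show 4 * ((((k + 2 : Nat)) : Int) - 2) - (r : Int) = (((4 * k - r : Nat)) : Int) by push_cast; omega,
            PySem.List.pyGetD_natCast]

theorem altCell_id (k : Nat) (rule : List Int) (r c : Nat)
    (hsq : r < k + 2 ∧ c < k + 2)
    (hb : ¬ (r = 0 ∨ r = k + 1 ∨ c = 0 ∨ c = k + 1)) (w : Option Int) :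
    altCell (((k + 2 : Nat)) : Int) ((((k + 2 : Nat)) : Int) - 2) rule (r : Int) (c : Int) w = w := by
  simp only [altCell]
  rw [if_neg (show ¬ (((r : Int) = 0 ∨ (r : Int) = ((k + 2 : Nat) : Int) - 1)
        ∧ ((c : Int) = 0 ∨ (c : Int) = ((k + 2 : Nat) : Int) - 1)) by push_cast; omega),
    if_neg (show ¬ (r : Int) = 0 by omega),
    if_neg (show ¬ (c : Int) = ((k + 2 : Nat) : Int) - 1 by push_cast; omega),
    if_neg (show ¬ (r : Int) = ((k + 2 : Nat) : Int) - 1 by push_cast; omega),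
    if_neg (show ¬ (c : Int) = 0 by omega)]

theorem main_nonneg (matrix : List (List (Option Int))) (rule : List Int) (k : Nat) :
    apply_rule_to_matrix matrix rule (k : Int) = apply_rule_to_matrix_alt matrix rule (k : Int) := by
  have hN : (k : Int) + 2 = (((k + 2 : Nat)) : Int) := by push_cast; ring
  rw [A_writes]
  apply eq_of_read
  · rw [length_wrs, length_alt matrix rule (k : Int) (k + 2) hN (by omega)]
  · intro r c
    rw [alt_read matrix rule (k : Int) (k + 2) hN (by omega) r c]
    by_cases hin : r < matrix.length ∧ c < (matrix.getD r []).length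
    · obtain ⟨h1, h2⟩ := hin
      have hread := readM_of_inRange matrix r c h1 h2
      rw [hread, Option.map_some]
      by_cases hsq : r < k + 2 ∧ c < k + 2
      · rw [if_pos hsq]
        by_cases hb : r = 0 ∨ r = k + 1 ∨ c = 0 ∨ c = k + 1
        · rw [read_allW k rule matrix r c (by omega) (by omega) hb h1 h2]
          rw [valAt_eq_altCell k rule r c (by omega) (by omega) hb ((matrix.getD r []).getD c none)]
        · rw [read_allW_off k rule matrix r c (by tauto), hread]
          rw [altCell_id k rule r c hsq hb]
      · rw [if_neg hsq]
        rw [read_allW_off k rule matrix r c (by omega), hread]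
    · rw [read_wrs_none _ _ _ _ hin]
      rw [(readM_eq_none_iff matrix r c).mpr hin]
      rfl

theorem main_neg_one (matrix : List (List (Option Int))) (rule : List Int) :
    apply_rule_to_matrix matrix rule (-1) = apply_rule_to_matrix_alt matrix rule (-1) := by
  have h1 : PySem.List.pyRange 0 1 1 = [0] := by decide
  have h2 : PySem.List.pyRange 1 1 1 = [] := by decide
  have h3 : PySem.List.pyRange (-1) (-1) (-1) = [] := by decide
  have h4 : PySem.List.pyRange (-1) 0 (-1) = [] := by decide
  have hA : apply_rule_to_matrix matrix rule (-1) = wr matrix 0 0 none := by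
    rw [← c00']
    norm_num [apply_rule_to_matrix, h1, h2, h3, h4]
  have hN : (-1 : Int) + 2 = (((1 : Nat)) : Int) := by norm_num
  rw [hA]
  apply eq_of_read
  · rw [length_wr, length_alt matrix rule (-1) 1 hN (by omega)]
  · intro r c
    rw [alt_read matrix rule (-1) 1 hN (by omega) r c, read_wr]
    by_cases h0 : r = 0 ∧ c = 0
    · obtain ⟨rfl, rfl⟩ := h0
      by_cases hin : 0 < matrix.length ∧ 0 < (matrix.getD 0 []).length
      · rw [if_pos ⟨rfl, rfl, hin.1, hin.2⟩]
        rw [readM_of_inRange matrix 0 0 hin.1 hin.2, Option.map_some]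
        rw [if_pos (by omega)]
        simp [altCell]
      · rw [if_neg (by tauto)]
        rw [(readM_eq_none_iff matrix 0 0).mpr hin]
        rfl
    · rw [if_neg (by tauto)]
      cases hm : readM matrix r c with
      | none => rfl
      | some w =>
        rw [Option.map_some, if_neg (by omega)]

theorem main_small (matrix : List (List (Option Int))) (rule : List Int) (size : Int)
    (h : size ≤ -2) :
    apply_rule_to_matrix matrix rule size = apply_rule_to_matrix_alt matrix rule size := by
  have h1 : PySem.List.pyRange 0 (size + 2) 1 = [] := PySem.List.pyRange_one_eq_nil (by omega)
  have h2 : PySem.List.pyRange 1 (size + 2) 1 = [] := PySem.List.pyRange_one_eq_nil (by omega)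
  have h3 : PySem.List.pyRange (size + 2 - 2) (-1) (-1) = [] := PySem.List.pyRange_neg_one_eq_nil (by omega)
  have h4 : PySem.List.pyRange (size + 2 - 2) 0 (-1) = [] := PySem.List.pyRange_neg_one_eq_nil (by omega)
  simp only [apply_rule_to_matrix, apply_rule_to_matrix_alt, h1, h2, h3, h4, List.foldl_nil,
    if_pos (show size + 2 ≤ 0 by omega)]

-- ===== VERDICT (by name: the statement is the Claim_ definition above) =====
theorem apply_rule_to_matrix_spec : Claim_equal_apply_rule_to_matrix := by
  intro matrix rule size _ _
  unfold Spec_apply_rule_to_matrix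
  by_cases h2 : size ≤ -2
  · exact main_small matrix rule size h2
  by_cases h1 : size = -1
  · subst h1; exact main_neg_one matrix rule
  have hs : 0 ≤ size := by omega
  obtain ⟨k, rfl⟩ := Int.eq_ofNat_of_zero_le hs
  exact main_nonneg matrix rule k
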